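-- pv_equiv track=rewrite | github.com/QCadjunct/ATLAS-Framework | src/atlas/core/version.py | is_compatible
-- ===== SOURCE A (Python) =====
-- __version_info__ = (1, 0, 0)
--
-- def is_compatible(required_version: str) -> bool:
--     """
--     Check if current version is compatible with required version.
--
--     Args:
--         required_version: Required version string (e.g., "1.0.0")
--
--     Returns:
--         bool: True if compatible, False otherwise
--     """
--     try:
--         required_parts = [int(x) for x in required_version.split(".")]
--         current_parts = list(__version_info__)
--
--         # Major version must match
--         if required_parts[0] != current_parts[0]:
--             return False
--
--         # Minor version must be >= required
--         if len(required_parts) > 1: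
--             if current_parts[1] < required_parts[1]:
--                 return False
--
--         # Patch version must be >= required
--         if len(required_parts) > 2:
--             if current_parts[1] == required_parts[1] and current_parts[2] < required_parts[2]:
--                 return False
--
--         return True
--
--     except (ValueError, IndexError):
--         return False
-- ===== SOURCE B (Python) =====
-- __version_info__ = (1, 0, 0)
--
-- def is_compatible(required_version: str) -> bool:
--     """Check if current version is compatible with required version."""
--     try:
--         req = [int(x) for x in required_version.split(".")]
--         cur = list(__version_info__)
--         ok = True
--         for i in range(min(len(req), 3) - 1, 0, -1):
--             ok = cur[i] > req[i] or (cur[i] == req[i] and ok)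
--         return req[0] == cur[0] and ok
--     except (ValueError, IndexError):
--         return False
-- ===== Notes on version B (the rewrite author's own statement) =====
-- stated objective: alternative
-- what changed: A's forward cascade of early-return guard branches is replaced by a single backwards loop (patch first, then minor) folding a boolean accumulator ok = cur[i] > req[i] or (cur[i] == req[i] and ok), combined with the major check at the end; no early returns.
import Mathlib
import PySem

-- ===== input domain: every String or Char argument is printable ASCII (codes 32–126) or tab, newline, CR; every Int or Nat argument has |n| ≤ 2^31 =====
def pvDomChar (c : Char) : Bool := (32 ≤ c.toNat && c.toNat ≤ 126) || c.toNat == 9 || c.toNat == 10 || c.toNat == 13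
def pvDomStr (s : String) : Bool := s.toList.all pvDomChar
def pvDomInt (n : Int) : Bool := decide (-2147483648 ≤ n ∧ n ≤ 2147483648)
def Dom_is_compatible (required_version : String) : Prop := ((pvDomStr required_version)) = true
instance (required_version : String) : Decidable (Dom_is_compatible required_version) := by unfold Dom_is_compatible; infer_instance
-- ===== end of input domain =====

-- B replaces A's forward cascade of early-return guards by one backwards loop (patch
-- first, then minor) folding a boolean accumulator, combined with the major check at
-- the end (objective: alternative); same return value on every input.

-- ===== PORT A =====
-- A's patch-version guard ("if len(required_parts) > 2: …"), kept as a helper because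
-- A reaches it from both sides of the minor-version branch
def pvPatchGuard (required_parts current_parts : List Int) : Bool :=
  if required_parts.length > 2 then
    match PySem.List.pyGet? current_parts 1, PySem.List.pyGet? required_parts 1,
          PySem.List.pyGet? current_parts 2, PySem.List.pyGet? required_parts 2 with
    | some c1, some r1, some c2, some r2 => if c1 = r1 ∧ c2 < r2 then false else true
    | _, _, _, _ => false  -- IndexError → except → False
  else true

def is_compatible (required_version : String) : Bool :=
  -- required_parts = [int(x) for x in required_version.split(".")]; ValueError → except → False
  -- (split? is none only for an empty separator, never here)
  match ((PySem.Str.split? required_version ".").getD []).mapM PySem.Int.ofStr? with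
  | none => false
  | some required_parts =>
    let current_parts : List Int := [1, 0, 0]
    match PySem.List.pyGet? required_parts 0, PySem.List.pyGet? current_parts 0 with
    | some r0, some c0 =>
      if r0 ≠ c0 then false
      else
        if required_parts.length > 1 then
          match PySem.List.pyGet? current_parts 1, PySem.List.pyGet? required_parts 1 with
          | some c1, some r1 =>
            if c1 < r1 then false else pvPatchGuard required_parts current_parts
          | _, _ => false  -- IndexError → except → False
        else pvPatchGuard required_parts current_parts
    | _, _ => false  -- IndexError → except → False

-- ===== PORT B =====
def is_compatible_alt (required_version : String) : Bool :=
  match ((PySem.Str.split? required_version ".").getD []).mapM PySem.Int.ofStr? with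
  | none => false  -- ValueError → except → False
  | some req =>
    let cur : List Int := [1, 0, 0]
    -- for i in range(min(len(req), 3) - 1, 0, -1): ok = cur[i] > req[i] or (cur[i] == req[i] and ok)
    -- every index i here satisfies 1 ≤ i < min(len(req), 3), so cur[i] and req[i] are
    -- in range and pyGetD is exact (IndexError unreachable)
    let ok := (PySem.List.pyRange (min (req.length : Int) 3 - 1) 0 (-1)).foldl
      (fun ok i =>
        PySem.List.pyGetD cur i 0 > PySem.List.pyGetD req i 0
        || (PySem.List.pyGetD cur i 0 == PySem.List.pyGetD req i 0 && ok)) true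
    -- return req[0] == cur[0] and ok
    match PySem.List.pyGet? req 0, PySem.List.pyGet? cur 0 with
    | some r0, some c0 => (r0 == c0) && ok
    | _, _ => false  -- IndexError → except → False

-- ===== PRECONDITION & SPEC =====
def Spec_is_compatible (required_version : String) (out : Bool) : Prop := out = is_compatible_alt required_version
instance (required_version : String) (out : Bool) : Decidable (Spec_is_compatible required_version out) := by unfold Spec_is_compatible; infer_instance

-- ===== CLAIM =====
def Claim_equal_is_compatible : Prop := ∀ (required_version : String), Dom_is_compatible required_version → Spec_is_compatible required_version (is_compatible required_version)

-- ===== LEMMAS AND PROOFS =====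

-- the core: A's branch cascade equals B's backwards fold, for every parsed list
theorem branches_eq_fold (req : List Int) :
    (match PySem.List.pyGet? req 0, PySem.List.pyGet? ([1, 0, 0] : List Int) 0 with
     | some r0, some c0 =>
       if r0 ≠ c0 then false
       else
         if req.length > 1 then
           match PySem.List.pyGet? ([1, 0, 0] : List Int) 1, PySem.List.pyGet? req 1 with
           | some c1, some r1 => if c1 < r1 then false else pvPatchGuard req [1, 0, 0]
           | _, _ => false
         else pvPatchGuard req [1, 0, 0]
     | _, _ => false)
    =
    (match PySem.List.pyGet? req 0, PySem.List.pyGet? ([1, 0, 0] : List Int) 0 with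
     | some r0, some c0 =>
       (r0 == c0) &&
         (PySem.List.pyRange (min (req.length : Int) 3 - 1) 0 (-1)).foldl
           (fun ok i =>
             PySem.List.pyGetD ([1, 0, 0] : List Int) i 0 > PySem.List.pyGetD req i 0
             || (PySem.List.pyGetD ([1, 0, 0] : List Int) i 0 == PySem.List.pyGetD req i 0 && ok)) true
     | _, _ => false) := by
  match req with
  | [] => rfl
  | [a] =>
    simp [PySem.List.pyGet?, PySem.List.pyIdx?, pvPatchGuard, PySem.List.pyRange]
    by_cases h : a = 1 <;> simp_all
  | [a, b] =>
    have hr : PySem.List.pyRange (min ((([a, b] : List Int).length : Int)) 3 - 1) 0 (-1) = [1] := by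
      simp; decide
    rw [hr]
    have hc1 : PySem.List.pyGetD ([a, b] : List Int) (1 : Int) 0 = b := by
      simp [PySem.List.pyGetD, PySem.List.pyGet?, PySem.List.pyIdx?]
    have hcur1 : PySem.List.pyGetD ([1, 0, 0] : List Int) (1 : Int) 0 = 0 := by decide
    simp only [List.foldl, hc1, hcur1]
    simp [PySem.List.pyGet?, PySem.List.pyIdx?, pvPatchGuard]
    by_cases ha : a = 1 <;> simp_all
    rw [Bool.eq_iff_iff]
    constructor <;> intro hrest <;> simp_all <;> omega
  | a :: b :: c :: t =>
    have hr : PySem.List.pyRange (min (((a :: b :: c :: t : List Int).length : Int)) 3 - 1) 0 (-1)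
        = [2, 1] := by
      have h : min (((a :: b :: c :: t : List Int).length : Int)) 3 = 3 := by simp; omega
      rw [h]; decide
    rw [hr]
    have hc2 : PySem.List.pyGetD (a :: b :: c :: t) (2 : Int) 0 = c := by
      have h : (2 : Int) ≤ ↑t.length + 1 + 1 := by omega
      simp [PySem.List.pyGetD, PySem.List.pyGet?, PySem.List.pyIdx?, h]
    have hc1 : PySem.List.pyGetD (a :: b :: c :: t) (1 : Int) 0 = b := by
      have h : (0 : Int) ≤ ↑t.length + 1 := by omega
      simp [PySem.List.pyGetD, PySem.List.pyGet?, PySem.List.pyIdx?, h]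
    have hcur2 : PySem.List.pyGetD ([1, 0, 0] : List Int) (2 : Int) 0 = 0 := by decide
    have hcur1 : PySem.List.pyGetD ([1, 0, 0] : List Int) (1 : Int) 0 = 0 := by decide
    simp only [List.foldl, hc2, hc1, hcur2, hcur1]
    have e1 : (0 : Int) ≤ ↑t.length + 1 + 1 := by omega
    have e2 : (0 : Int) ≤ ↑t.length + 1 := by omega
    have e3 : (2 : Int) ≤ ↑t.length + 1 + 1 := by omega
    simp [PySem.List.pyGet?, PySem.List.pyIdx?, pvPatchGuard, e1, e2, e3]
    by_cases ha : a = 1 <;> simp_all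
    rw [Bool.eq_iff_iff]
    constructor <;> intro hrest <;> simp_all <;> omega

-- ===== VERDICT =====
theorem is_compatible_spec : Claim_equal_is_compatible := by
  intro s _
  unfold Spec_is_compatible is_compatible is_compatible_alt
  cases h : ((PySem.Str.split? s ".").getD []).mapM PySem.Int.ofStr? with
  | none => rfl
  | some req => exact branches_eq_fold req
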